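/-
  A SMALL WORKED EXAMPLE OF THE METHOD, THROUGH THE VERIFICATION-CONDITION GENERATOR: `byte_copy` of `proofs/c/toy1.c` (24 bytes at 1000E0H of
  toy1.bin = of inflate4.bin) proved with `v3_walk` + `v3_open` / `v3_omega` + `v3_frame` / `v3_kept`. Same theorem as
  Prog/ByteCopyV3.lean (`byte_copy_correct_v3`), same contract `CopyPre` (stated again here); the loop invariant says only WHAT CHANGED
  (rax, rcx, the `i` bytes copied) — code, return address and source being unchanged is derived by the frame tactics, not carried.
  `byte_copy_correct_vc` is the statement about `X86.run` from any machine in `User.Abs`; `byte_copy_correct_machine` is the same with nothing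
  of the user machine in the conclusion.
-/
import X86.Derived.Prog.Walk
import X86.Derived.Prog.FrameTac
import X86.Derived.User.Frame
import Prog.Toy1Bytes

namespace X86.Vc
open X86.User (CodeAt RegsKept Span FlagsOK Layout toNat_add_ofNat toNat_ofNat_lt' add_ofNat_add)
open X86 Toy1Bytes Word

set_option maxRecDepth 10000
set_option maxHeartbeats 4000000
set_option linter.unusedSimpArgs false
set_option linter.unusedVariables false

/-- What `byte_copy` needs of its caller (= `X86.CopyPre` of Prog/ByteCopyV3.lean). `v0` is the view on entry. -/
structure CopyPre (n : User.Layout) (v0 : User.State) (dst src len ret : Word) : Prop where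
  code : CodeAt v0.mem 0x1000e0 byte_copy_bytes
  mapped : 0x200000 ≤ n.pages * 0x200000
  nle : n.pages ≤ 512
  rip : v0.rip = 0x1000e0
  rdi : v0.reg .rdi = dst
  rsi : v0.reg .rsi = src
  rdx : v0.reg .rdx = len
  sp : User.inRange n.pages (v0.reg .rsp) 8
  retAddr : UInt64.ofNat (v0.mem.readLE (v0.reg .rsp) 8) = ret
  retlt : ret < 0x40000000
  srcR : User.inRange n.pages src len.toNat
  dstR : User.inRange n.pages dst len.toNat
  dstLo : 0x100000 ≤ dst.toNat
  srcOut : 0x100000 ≤ src.toNat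
  spOut : 0x100000 ≤ (v0.reg .rsp).toNat
  dCode : dst.toNat + len.toNat ≤ 0x1000e0 ∨ 0x1000e0 + 24 ≤ dst.toNat
  dStack : dst.toNat + len.toNat ≤ (v0.reg .rsp).toNat ∨ (v0.reg .rsp).toNat + 8 ≤ dst.toNat
  dSrc : dst.toNat + len.toNat ≤ src.toNat ∨ src.toNat + len.toNat ≤ dst.toNat

theorem CopyPre.fetch {n : User.Layout} {v0 : User.State} {dst src len ret : Word} (hp : CopyPre n v0 dst src len ret) (a : Word)
    (ha : 0x100000 ≤ a.toNat ∧ a.toNat + 15 ≤ 0x200000) : n.Has a 15 := by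
  have := hp.mapped; unfold User.Layout.Has User.Layout.lo User.Layout.hi; omega

/-- The loop invariant at 1000F2H (`cmp rax, rdx`), after `i` bytes. -/
structure CopyInv (v0 : User.State) (dst src len : Word) (i : Nat) (v : User.State) : Prop where
  rip : v.rip = 0x1000f2
  rax : v.reg .rax = UInt64.ofNat i
  ile : i ≤ len.toNat
  kept : RegsKept [.rax, .rcx] v0 v
  mem : v.mem = v0.mem.load dst (v0.mem.readBytes src i)

variable {n : User.Layout} {v0 : User.State} {dst src len ret : Word}

/-- One trip round the loop (back at 1000F2H with `i + 1`), or out of it (at the `ret`, 1000F7H, with `i = len`). -/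
theorem copy_body (hp : CopyPre n v0 dst src len ret) (i : Nat) (v : User.State) (hi : CopyInv v0 dst src len i v) :
    Reach n v (fun v' => (v'.rip = 0x1000f7 ∧ RegsKept [.rax, .rcx] v0 v' ∧ v'.mem = v0.mem.load dst (v0.mem.readBytes src len.toNat)) ∨
      (CopyInv v0 dst src len (i + 1) v' ∧ len.toNat - (i + 1) < len.toNat - i)) := by
  v3_open hp hi
  have hcode : CodeAt v.mem 0x1000e0 byte_copy_bytes := by rw [hi_mem]; v3_frame hp_code
  v3_walk hcode hp.fetch [] until [0x1000f2, 0x1000f7]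
  · have hsrc : v.mem.read (src + UInt64.ofNat i) = v0.mem.read (src + UInt64.ofNat i) := by rw [hi_mem]; v3_frame rfl
    refine Reach.done (Or.inr ⟨⟨by simp, by simp [UInt64.ofNat_add], by v3_omega, by v3_kept, ?_⟩, by v3_omega⟩)
    simp only [User.State.mem_setReg, User.State.mem_setFlags, User.State.mem_setRip, User.State.mem_setMem]
    rw [User.Mem.writeLE_one, User.Mem.readLE_one', hsrc, hi_mem, User.Mem.readBytes_succ_snoc, User.Mem.load_snoc, User.Mem.length_readBytes]
    congr 1; word_omega
  · have : i = len.toNat := by v3_omega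
    exact Reach.done (Or.inl ⟨by simp, by v3_kept, by simp [hi_mem, this]⟩)

/-- **`byte_copy` is correct** (view level; same statement as `byte_copy_reach` of Prog/ByteCopyV3.lean). -/
theorem byte_copy_reach (hp : CopyPre n v0 dst src len ret) :
    Reach n v0 (fun v' => v'.rip = ret ∧ v'.reg .rsp = v0.reg .rsp + 8 ∧
      v'.mem = v0.mem.load dst (v0.mem.readBytes src len.toNat) ∧ ∀ r, r ≠ .rax → r ≠ .rcx → r ≠ .rsp → v'.reg r = v0.reg r) := by
  v3_open hp
  v3_walk hp_code hp.fetch [] until [0x1000f2]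
  refine Reach.trans (Reach.loop (Inv := fun v => ∃ i, CopyInv v0 dst src len i v)
    (Post := fun v => v.rip = 0x1000f7 ∧ RegsKept [.rax, .rcx] v0 v ∧ v.mem = v0.mem.load dst (v0.mem.readBytes src len.toNat)) (fun v => len.toNat - (v.reg .rax).toNat) ?_ _ ?_) ?_
  · intro v ⟨i, hi⟩
    refine (copy_body hp i v hi).mono fun v' h => h.imp id fun ⟨hi', hlt⟩ => ⟨⟨_, hi'⟩, ?_⟩
    have := hi.ile; have := hi'.ile; rw [hi'.rax, hi.rax]; word_omega
  · exact ⟨0, by simp, by simp, by omega, by v3_kept, rfl⟩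
  · intro v ⟨hrip, hk, hmem⟩
    have hcode : CodeAt v.mem 0x1000e0 byte_copy_bytes := by rw [hmem]; v3_frame hp_code
    have hret : UInt64.ofNat (v.mem.readLE (v0.reg .rsp) 8) = ret := by rw [hmem]; v3_frame hp_retAddr
    v3_walk hcode hp.fetch [hret, hp_retlt]
    exact Reach.done ⟨by simp [hret], by simp [hk.get .rsp rfl], by simp [hmem], fun r h1 h2 h3 => by simp [h3, hk r (by simp [Reg.isIn, h1.symm, h2.symm])]⟩

/-- **`byte_copy` is correct on the model** (machine level) — through the VC generator and the flat user machine. The statement is about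
the FULL machine: `X86.run` with the model's decoder; `User.Abs` says which machines (long mode, flat segments, the identity tables, …) and
relates them to the user state the contract is about. -/
theorem byte_copy_correct_vc {n : User.Layout} (μ : Microarch) (hμ : MicroOK μ) (m : Machine) (v0 : User.State) (ha : User.Abs n m v0)
    (dst src len ret : Word) (hp : CopyPre n v0 dst src len ret) :
    ∃ k m' v', _root_.X86.run (Dec.decoder μ (Dec.mkTable X86.allRows)) m k = .next m' ∧ User.Abs n m' v' ∧
      v'.rip = ret ∧ v'.reg .rsp = v0.reg .rsp + 8 ∧
      v'.mem = v0.mem.load dst (v0.mem.readBytes src len.toNat) ∧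
      (∀ r, r ≠ .rax → r ≠ .rcx → r ≠ .rsp → v'.reg r = v0.reg r) ∧
      m'.sysPart = m.sysPart := by
  obtain ⟨k, m', v', h1, h2, ⟨h3, h4, h5, h6⟩, h7⟩ := (byte_copy_reach hp).sound μ hμ m ha
  exact ⟨k, m', v', h1, h2, h3, h4, h5, h6, h7⟩

/-- **The same theorem with NOTHING of the user machine in the conclusion**: a machine `m` whose hidden part is as `User.Base` says (long mode,
flat segments, the identity tables with whatever Accessed / Dirty flags, nothing pending) and whose registers and memory meet the contract
runs, under `X86.run` with the model's decoder, to a machine `m'` in `User.Base` again, with RIP at the return address, RSP popped, the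
registers other than RAX / RCX / RSP unchanged, every byte of the user region equal to the old memory with the `len` bytes copied, and the
system part of the machine (segments, descriptor tables, control / debug / model-specific registers, configuration …) untouched. -/
theorem byte_copy_correct_machine {n : User.Layout} (μ : Microarch) (hμ : MicroOK μ) (m : Machine) (hb : User.Base n m)
    (dst src len ret : Word) (hp : CopyPre n (User.State.ofMachine m) dst src len ret) :
    ∃ k m', _root_.X86.run (Dec.decoder μ (Dec.mkTable X86.allRows)) m k = .next m' ∧ User.Base n m' ∧
      m'.rip = ret ∧ m'.reg .rsp = m.reg .rsp + 8 ∧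
      (∀ a, n.user a → m'.phys.read a =
        ((User.Mem.ofPhys m.phys).load dst ((User.Mem.ofPhys m.phys).readBytes src len.toNat)).read a) ∧
      (∀ r, r ≠ .rax → r ≠ .rcx → r ≠ .rsp → m'.reg r = m.reg r) ∧
      m'.sysPart = m.sysPart := by
  obtain ⟨k, m', v', hrun, ha', h1, h2, h3, h4, hsys⟩ :=
    byte_copy_correct_vc μ hμ m _ (User.Abs.of_base hb) dst src len ret hp
  refine ⟨k, m', hrun, ha'.base, ha'.rip.trans h1, (ha'.reg .rsp).trans h2, ?_, ?_, hsys⟩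
  · intro a hu
    rw [ha'.mem a hu, h3]
    rfl
  · intro r r1 r2 r3
    exact (ha'.reg r).trans (h4 r r1 r2 r3)

end X86.Vc
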